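-- pv_equiv track=rewrite | github.com/retrohun/Winchesterduino | Winchesterduino/WDI/wdi/parser.py | getInterleave
-- ===== SOURCE A (Python) =====
-- def getInterleave(sectorMap):
--     if (len(sectorMap) == 0):
--         return None
--     elif (len(sectorMap) < 3):
--         return "1:1"
--     try:
--         interleave = sectorMap.index(sectorMap[0]+1)
--         verify = interleave
--         for idx in range(len(sectorMap)):
--             if ((len(sectorMap)-(idx+1)) > interleave):
--                 verify = sectorMap[idx+1:].index(sectorMap[idx+1]+1)
--                 if (verify != interleave):
--                     break
--         return (str(interleave) + ":1") if (interleave == verify) else "unknown"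
--     except:
--         pass
--     return "unknown"
-- ===== SOURCE B (Python) =====
-- def getInterleave(sectorMap):
--     n = len(sectorMap)
--     if n == 0:
--         return None
--     if n < 3:
--         return "1:1"
--     # One right-to-left pass: nxt[j] = smallest index i >= j with sectorMap[i] == sectorMap[j] + 1
--     nxt = [None] * n
--     first = {}
--     for j in range(n - 1, -1, -1):
--         first[sectorMap[j]] = j
--         nxt[j] = first.get(sectorMap[j] + 1)
--     k = nxt[0]
--     if k is None:
--         return "unknown"
--     for j in range(1, n - k):
--         if nxt[j] != j + k:
--             return "unknown"
--     return str(k) + ":1"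
-- ===== Notes on version B (the rewrite author's own statement) =====
-- stated objective: alternative
-- what changed: Replaces A's repeated list.index scans over every suffix with a single right-to-left pass that maintains a value->nearest-later-index dict, precomputing nxt[j] = first index >= j holding sectorMap[j]+1, then one linear verification loop over nxt.
import Mathlib
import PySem

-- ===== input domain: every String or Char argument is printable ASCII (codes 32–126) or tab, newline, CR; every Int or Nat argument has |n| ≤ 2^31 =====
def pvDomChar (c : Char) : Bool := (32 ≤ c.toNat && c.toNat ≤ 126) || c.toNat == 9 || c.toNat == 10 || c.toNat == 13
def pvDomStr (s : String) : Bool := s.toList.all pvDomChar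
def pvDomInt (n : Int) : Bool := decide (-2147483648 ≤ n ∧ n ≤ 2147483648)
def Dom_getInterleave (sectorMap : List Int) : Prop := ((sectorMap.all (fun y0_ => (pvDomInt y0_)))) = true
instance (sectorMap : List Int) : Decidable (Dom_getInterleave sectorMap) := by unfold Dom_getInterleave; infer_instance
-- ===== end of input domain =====

-- B replaces A's repeated suffix .index scans by one right-to-left pass with a
-- value -> nearest-later-index dict plus a linear verification loop (objective: alternative).

-- ===== PORT A =====
-- the 'for idx in range(len(sectorMap))' loop of A; 'none' = an exception caught by A's bare 'except'
def getInterleaveLoop (sm : List Int) (k : Int) (idx : Nat) (verify : Int) : Option Int :=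
  if h : idx < sm.length then
    if (sm.length : Int) - ((idx : Int) + 1) > k then
      match PySem.List.pyGet? sm ((idx : Int) + 1) with
      | none => none
      | some v =>
        match PySem.List.index? (PySem.List.slice sm (some ((idx : Int) + 1)) none) (v + 1) with
        | none => none
        | some r =>
          if (r : Int) ≠ k then some (r : Int)          -- 'break': the loop ends with verify ≠ interleave
          else getInterleaveLoop sm k (idx + 1) (r : Int)
    else getInterleaveLoop sm k (idx + 1) verify
  else some verify
termination_by sm.length - idx

def getInterleave (sectorMap : List Int) : Option String :=
  if sectorMap.length = 0 then none
  else if sectorMap.length < 3 then some "1:1"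
  else
    match PySem.List.pyGet? sectorMap 0 with
    | none => some "unknown"
    | some v0 =>
      match PySem.List.index? sectorMap (v0 + 1) with
      | none => some "unknown"
      | some kN =>
        match getInterleaveLoop sectorMap (kN : Int) 0 (kN : Int) with
        | none => some "unknown"
        | some verify =>
          if (kN : Int) = verify then some (PySem.Int.toStr (kN : Int) ++ ":1")
          else some "unknown"

-- ===== PORT B =====
-- Source B's right-to-left pass (j descending): first[sm[j]] = j; nxt[j] = first.get(sm[j]+1)
def buildNxt : List Int → Int → List (Option Int) × PySem.Dict Int Int
  | [], _ => ([], PySem.Dict.empty)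
  | x :: rest, j =>
    let p := buildNxt rest (j + 1)
    let d := p.2.insert x j
    (d.get? (x + 1) :: p.1, d)

-- Source B's 'for j in range(1, n - k): if nxt[j] != j + k: return "unknown"'
def altCheck (nxt : List (Option Int)) (k : Int) : List Int → Bool
  | [] => true
  | j :: rest =>
    if (PySem.List.pyGet? nxt j).join = some (j + k) then altCheck nxt k rest
    else false

def getInterleave_alt (sectorMap : List Int) : Option String :=
  if sectorMap.length = 0 then none
  else if sectorMap.length < 3 then some "1:1"
  else
    let nxt := (buildNxt sectorMap 0).1
    match (PySem.List.pyGet? nxt 0).join with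
    | none => some "unknown"
    | some k =>
      if altCheck nxt k (PySem.List.pyRange 1 ((sectorMap.length : Int) - k) 1) then
        some (PySem.Int.toStr k ++ ":1")
      else some "unknown"

-- ===== PRECONDITION & SPEC =====
def Spec_getInterleave (sectorMap : List Int) (out : Option String) : Prop := out = getInterleave_alt sectorMap
instance (sectorMap : List Int) (out : Option String) : Decidable (Spec_getInterleave sectorMap out) := by unfold Spec_getInterleave; infer_instance

-- ===== CLAIM (what is proved, stated in full; the proofs are below) =====
def Claim_equal_getInterleave : Prop := ∀ (sectorMap : List Int), Dom_getInterleave sectorMap → Spec_getInterleave sectorMap (getInterleave sectorMap)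

-- ===== LEMMAS AND PROOFS =====

-- the dict after processing sm starting at index j0 finds the first occurrence of v in sm
theorem buildNxt_get? (sm : List Int) (j0 v : Int) :
    ((buildNxt sm j0).2).get? v = (PySem.List.index? sm v).map (fun r : Nat => j0 + (r : Int)) := by
  induction sm generalizing j0 with
  | nil => simp [buildNxt, PySem.Dict.get?_empty, PySem.List.index?_eq_idxOf?]
  | cons x rest ih =>
    simp only [buildNxt]
    rw [PySem.Dict.get?_insert]
    by_cases hv : v = x
    · subst hv
      rw [if_pos rfl, PySem.List.index?_cons_self]
      simp
    · rw [if_neg hv,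
          PySem.List.index?_cons_of_ne rest (Ne.symm hv),
          ih (j0 + 1), Option.map_map]
      congr 1
      funext r
      simp only [Function.comp_apply]
      push_cast
      ring

-- entry i of the nxt list: first occurrence of sm[i]+1 at or after i, as an absolute index
theorem buildNxt_fst_get (sm : List Int) (j0 : Int) (i : Nat) :
    ((buildNxt sm j0).1)[i]? =
      (sm[i]?).map (fun x =>
        (PySem.List.index? (sm.drop i) (x + 1)).map (fun r : Nat => j0 + (i : Int) + (r : Int))) := by
  induction sm generalizing j0 i with
  | nil => simp [buildNxt]
  | cons x rest ih =>
    cases i with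
    | zero =>
      have h := buildNxt_get? (x :: rest) j0 (x + 1)
      simp only [buildNxt] at h ⊢
      simp [h]
    | succ n =>
      simp only [buildNxt, List.getElem?_cons_succ, List.drop_succ_cons]
      rw [ih (j0 + 1) n]
      congr 1
      funext y
      congr 1
      funext r
      push_cast
      ring

-- A's loop, started with verify = interleave = K, succeeds iff every in-range suffix check gives K
theorem loopA_char (sm : List Int) (K : Nat) (idx : Nat) :
    getInterleaveLoop sm (K : Int) idx (K : Int) = some (K : Int) ↔
      (∀ j : Nat, idx < j → j + K < sm.length →
        PySem.List.index? (sm.drop j) ((sm[j]?).getD 0 + 1) = some K) := by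
  have main : ∀ fuel idx, sm.length - idx ≤ fuel →
      (getInterleaveLoop sm (K : Int) idx (K : Int) = some (K : Int) ↔
        (∀ j : Nat, idx < j → j + K < sm.length →
          PySem.List.index? (sm.drop j) ((sm[j]?).getD 0 + 1) = some K)) := by
    intro fuel
    induction fuel with
    | zero =>
      intro idx hle
      rw [getInterleaveLoop, dif_neg (by omega)]
      exact iff_of_true rfl (fun j hj hjK => absurd hjK (by omega))
    | succ f ih =>
      intro idx hle
      by_cases hidx : idx < sm.length
      · rw [getInterleaveLoop, dif_pos hidx]
        by_cases hg : (sm.length : Int) - ((idx : Int) + 1) > (K : Int)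
        · rw [if_pos hg]
          have hbound : idx + 1 + K < sm.length := by omega
          have h1 : idx + 1 < sm.length := by omega
          have hcast : ((idx : Int) + 1) = ((idx + 1 : Nat) : Int) := by push_cast; ring
          have hget : PySem.List.pyGet? sm ((idx : Int) + 1) = some sm[idx + 1] := by
            rw [hcast, PySem.List.pyGet?_natCast, List.getElem?_eq_getElem h1]
          have hslice : PySem.List.slice sm (some ((idx : Int) + 1)) none = sm.drop (idx + 1) := by
            rw [hcast, PySem.List.slice_from_natCast]
          simp only [hget, hslice]
          cases hi : PySem.List.index? (sm.drop (idx + 1)) (sm[idx + 1] + 1) with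
          | none =>
            dsimp only
            apply iff_of_false
            · intro h; simp at h
            · intro h
              have h2 := h (idx + 1) (by omega) hbound
              rw [List.getElem?_eq_getElem h1, Option.getD_some, hi] at h2
              simp at h2
          | some r =>
            dsimp only
            by_cases hr : (r : Int) ≠ (K : Int)
            · rw [if_pos hr]
              have hKr : r ≠ K := fun h => hr (by exact_mod_cast congrArg (fun n : Nat => (n : Int)) h)
              apply iff_of_false
              · intro h; exact hr (Option.some.inj h)
              · intro h
                have h2 := h (idx + 1) (by omega) hbound
                rw [List.getElem?_eq_getElem h1, Option.getD_some, hi] at h2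
                exact hKr (Option.some.inj h2)
            · have hrK : r = K := by exact_mod_cast not_not.mp hr
              subst hrK
              rw [if_neg (by simp)]
              rw [ih (idx + 1) (by omega)]
              constructor
              · intro h j hj hjK
                rcases Nat.lt_or_ge (idx + 1) j with h' | h'
                · exact h j h' hjK
                · have hje : j = idx + 1 := by omega
                  subst hje
                  rw [List.getElem?_eq_getElem h1, Option.getD_some]
                  exact hi
              · intro h j hj hjK
                exact h j (by omega) hjK
        · rw [if_neg hg]
          rw [ih (idx + 1) (by omega)]
          constructor
          · intro h j hj hjK
            rcases Nat.lt_or_ge (idx + 1) j with h' | h'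
            · exact h j h' hjK
            · have hje : j = idx + 1 := by omega
              subst hje
              exact absurd hjK (by omega)
          · intro h j hj hjK
            exact h j (by omega) hjK
      · rw [getInterleaveLoop, dif_neg hidx]
        exact iff_of_true rfl (fun j hj hjK => absurd hjK (by omega))
  exact main (sm.length - idx) idx le_rfl

theorem altCheck_eq_all (nxt : List (Option Int)) (k : Int) (js : List Int) :
    altCheck nxt k js = js.all (fun j => decide ((PySem.List.pyGet? nxt j).join = some (j + k))) := by
  induction js with
  | nil => rfl
  | cons j rest ih =>
    simp only [altCheck, List.all_cons, ih]
    by_cases h : (PySem.List.pyGet? nxt j).join = some (j + k)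
    · simp [h]
    · simp [h]

-- ===== VERDICT (by name: the statement is the Claim_ definition above) =====
theorem getInterleave_spec : Claim_equal_getInterleave := by
  intro sm _
  unfold Spec_getInterleave getInterleave getInterleave_alt
  by_cases h0 : sm.length = 0
  · simp [h0]
  by_cases h3 : sm.length < 3
  · simp [h0, h3]
  simp only [if_neg h0, if_neg h3]
  have h0lt : 0 < sm.length := by omega
  have hget0 : PySem.List.pyGet? sm 0 = some sm[0] := by
    rw [PySem.List.pyGet?_zero, List.getElem?_eq_getElem h0lt]
  have hnxt0 : PySem.List.pyGet? ((buildNxt sm 0).1) 0 =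
      some ((PySem.List.index? sm (sm[0] + 1)).map (fun r : Nat => (r : Int))) := by
    rw [PySem.List.pyGet?_zero, buildNxt_fst_get sm 0 0, List.getElem?_eq_getElem h0lt]
    simp
  have hjoin : (PySem.List.pyGet? ((buildNxt sm 0).1) 0).join =
      (PySem.List.index? sm (sm[0] + 1)).map (fun r : Nat => (r : Int)) := by
    rw [hnxt0]; rfl
  cases hK : PySem.List.index? sm (sm[0] + 1) with
  | none =>
    rw [hK] at hjoin
    simp only [hget0, hK, hjoin, Option.map_none]
  | some K =>
    rw [hK] at hjoin
    simp only [hget0, hK, hjoin, Option.map_some]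
    have key : (getInterleaveLoop sm (K : Int) 0 (K : Int) = some (K : Int)) ↔
        altCheck ((buildNxt sm 0).1) (K : Int)
          (PySem.List.pyRange 1 ((sm.length : Int) - (K : Int)) 1) = true := by
      rw [loopA_char, altCheck_eq_all, List.all_eq_true]
      simp only [decide_eq_true_eq]
      constructor
      · intro h j hj
        rw [PySem.List.mem_pyRange_one] at hj
        obtain ⟨hj1, hj2⟩ := hj
        set jn := j.toNat with hjn
        have hjcast : (jn : Int) = j := Int.toNat_of_nonneg (by omega)
        have hjlen : jn + K < sm.length := by omega
        have hjlt : jn < sm.length := by omega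
        have h2 := h jn (by omega) hjlen
        rw [List.getElem?_eq_getElem hjlt, Option.getD_some] at h2
        have hval : PySem.List.pyGet? ((buildNxt sm 0).1) j =
            some ((PySem.List.index? (sm.drop jn) (sm[jn] + 1)).map
              (fun r : Nat => (jn : Int) + (r : Int))) := by
          rw [← hjcast, PySem.List.pyGet?_natCast, buildNxt_fst_get sm 0 jn,
              List.getElem?_eq_getElem hjlt]
          simp
        rw [hval]
        show (PySem.List.index? (sm.drop jn) (sm[jn] + 1)).map
            (fun r : Nat => (jn : Int) + (r : Int)) = some (j + (K : Int))
        rw [h2, Option.map_some, hjcast]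
      · intro h j hj1 hj2
        have hjlt : j < sm.length := by omega
        have hmem : ((j : Nat) : Int) ∈ PySem.List.pyRange 1 ((sm.length : Int) - (K : Int)) 1 :=
          PySem.List.mem_pyRange_one.mpr ⟨by omega, by omega⟩
        have h2 := h (j : Int) hmem
        rw [PySem.List.pyGet?_natCast, buildNxt_fst_get sm 0 j,
            List.getElem?_eq_getElem hjlt] at h2
        simp only [Option.map_some, Option.join_some, zero_add] at h2
        rw [List.getElem?_eq_getElem hjlt, Option.getD_some]
        cases hi : PySem.List.index? (sm.drop j) (sm[j] + 1) with
        | none => rw [hi] at h2; simp at h2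
        | some r =>
          rw [hi] at h2
          simp only [Option.map_some, Option.some.injEq] at h2
          have hr : r = K := by omega
          rw [hr]
    by_cases hA : getInterleaveLoop sm (K : Int) 0 (K : Int) = some (K : Int)
    · have hB := key.mp hA
      simp only [hA, hB, if_pos]
    · have hB : altCheck ((buildNxt sm 0).1) (K : Int)
          (PySem.List.pyRange 1 ((sm.length : Int) - (K : Int)) 1) = false := by
        cases hx : altCheck ((buildNxt sm 0).1) (K : Int)
            (PySem.List.pyRange 1 ((sm.length : Int) - (K : Int)) 1) with
        | false => rfl
        | true => exact absurd (key.mpr hx) hA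
      cases hl : getInterleaveLoop sm (K : Int) 0 (K : Int) with
      | none => simp only [hB, Bool.false_eq_true, if_false]
      | some v =>
        have hv : (K : Int) ≠ v := fun h => hA (by rw [hl, h])
        simp only [hB, Bool.false_eq_true, if_false, if_neg hv]
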